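-- pv_equiv track=rewrite | github.com/Tadeo-Casiraghi/visualizacion-de-datos | extra_mig.py | get_neto
-- ===== SOURCE A (Python) =====
-- def get_neto(edges):
--     edges_neto = {}
--     # Iterate through the list of tuples
--     for name1, name2, value in edges:
--         if (name1, name2) in edges_neto:
--             edges_neto[(name1, name2)] += value
--         else:
--             # Add to the dictionary by sorting the pair to avoid ('B', 'A') being separate from ('A', 'B')
--             if (name2, name1) in edges_neto:
--                 edges_neto[(name2, name1)] -= value
--             else:
--                 edges_neto[(name1, name2)] = value
--
--     # Create the resulting list with only positive net flows
--     return [(name1, name2, flow) if flow > 0 else (name2, name1, -flow) for (name1, name2), flow in edges_neto.items() if flow != 0]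
-- ===== SOURCE B (Python) =====
-- def get_neto(edges):
--     # First pass: sum values per exact directed key
--     directed = {}
--     for a, b, v in edges:
--         directed[(a, b)] = directed.get((a, b), 0) + v
--     # Second pass: net each undirected pair once, in first-appearance order
--     out = []
--     done = set()
--     for (a, b), s in directed.items():
--         if (a, b) in done:
--             continue
--         done.add((b, a))
--         net = s - (directed.get((b, a), 0) if a != b else 0)
--         if net > 0:
--             out.append((a, b, net))
--         elif net < 0:
--             out.append((b, a, -net))
--     return out
-- ===== Notes on version B (the rewrite author's own statement) =====
-- stated objective: alternative
-- what changed: B replaces A's single branching fold (which nets reverse edges into one first-orientation dict key on the fly) by two passes: a plain directed-sum dict keyed by the exact (name1,name2) tuples, then a scan of its items that nets each pair against its reverse once, tracking handled reverses in a set.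
import Mathlib
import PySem

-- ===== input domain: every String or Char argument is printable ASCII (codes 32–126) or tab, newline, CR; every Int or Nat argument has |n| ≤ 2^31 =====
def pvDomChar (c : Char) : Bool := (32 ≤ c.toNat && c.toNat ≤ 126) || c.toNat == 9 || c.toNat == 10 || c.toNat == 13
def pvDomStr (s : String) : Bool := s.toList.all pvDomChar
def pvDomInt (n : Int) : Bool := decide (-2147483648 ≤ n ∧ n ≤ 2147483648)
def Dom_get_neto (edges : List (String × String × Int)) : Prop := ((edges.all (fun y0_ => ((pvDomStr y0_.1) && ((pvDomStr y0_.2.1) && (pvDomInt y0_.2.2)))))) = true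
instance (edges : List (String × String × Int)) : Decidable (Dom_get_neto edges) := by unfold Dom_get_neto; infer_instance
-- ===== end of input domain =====

-- B differs from A by decomposition: a directed-sum dict plus a netting scan, instead of A's
-- single fold that merges reverse edges into the first-seen orientation on the fly ('alternative', same cost).

-- ===== PORT A =====
-- A's loop body: accumulate into the first-seen orientation of the pair
def get_neto_stepA (d : PySem.Dict (String × String) Int) (e : String × String × Int) :
    PySem.Dict (String × String) Int :=
  if d.contains (e.1, e.2.1) then d.modify (e.1, e.2.1) 0 (· + e.2.2)
  else if d.contains (e.2.1, e.1) then d.modify (e.2.1, e.1) 0 (· - e.2.2)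
  else d.insert (e.1, e.2.1) e.2.2

def get_neto (edges : List (String × String × Int)) : List (String × String × Int) :=
  let edges_neto := edges.foldl get_neto_stepA PySem.Dict.empty
  edges_neto.items.filterMap (fun p =>
    if p.2 ≠ 0 then some (if p.2 > 0 then (p.1.1, p.1.2, p.2) else (p.1.2, p.1.1, -p.2)) else none)

-- ===== PORT B =====
-- B pass 1: plain directed sums keyed by the exact (name1, name2) tuple
def get_neto_alt_dirStep (d : PySem.Dict (String × String) Int) (e : String × String × Int) :
    PySem.Dict (String × String) Int :=
  d.insert (e.1, e.2.1) (d.getD (e.1, e.2.1) 0 + e.2.2)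

-- B pass 2 body: net a pair against its reverse once, skipping handled reverses
def get_neto_alt_body (directed : PySem.Dict (String × String) Int)
    (acc : List (String × String × Int) × PySem.Set (String × String))
    (p : (String × String) × Int) : List (String × String × Int) × PySem.Set (String × String) :=
  if PySem.Set.contains acc.2 p.1 then acc
  else
    let done := PySem.Set.add acc.2 (p.1.2, p.1.1)
    let net := p.2 - (if p.1.1 ≠ p.1.2 then directed.getD (p.1.2, p.1.1) 0 else 0)
    if net > 0 then (acc.1 ++ [(p.1.1, p.1.2, net)], done)
    else if net < 0 then (acc.1 ++ [(p.1.2, p.1.1, -net)], done)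
    else (acc.1, done)

def get_neto_alt (edges : List (String × String × Int)) : List (String × String × Int) :=
  let directed := edges.foldl get_neto_alt_dirStep PySem.Dict.empty
  (directed.items.foldl (get_neto_alt_body directed) ([], PySem.Set.empty)).1

-- ===== PRECONDITION & SPEC =====
def Spec_get_neto (edges : List (String × String × Int)) (out : List (String × String × Int)) : Prop := out = get_neto_alt edges
instance (edges : List (String × String × Int)) (out : List (String × String × Int)) : Decidable (Spec_get_neto edges out) := by unfold Spec_get_neto; infer_instance

-- ===== CLAIM (what is proved, stated in full; the proofs are below) =====
def Claim_equal_get_neto : Prop := ∀ (edges : List (String × String × Int)), Dom_get_neto edges → Spec_get_neto edges (get_neto edges)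

-- ===== LEMMAS AND PROOFS =====


-- key of an edge, swap of a pair
def pvKey (e : String × String × Int) : String × String := (e.1, e.2.1)
def pvSwap (p : String × String) : String × String := (p.2, p.1)

-- first-seen orientation keys (A's dict key order)
def pvUpd (acc : List (String × String)) (k : String × String) : List (String × String) :=
  if k ∈ acc ∨ pvSwap k ∈ acc then acc else acc ++ [k]
def pvFK (l : List (String × String × Int)) : List (String × String) :=
  l.foldl (fun acc e => pvUpd acc (pvKey e)) []

-- edge contribution to A's net at key k, and the two aggregate views
def pvContrib (k : String × String) (e : String × String × Int) : Int :=
  if pvKey e = k then e.2.2 else if pvKey e = pvSwap k ∧ k.1 ≠ k.2 then -e.2.2 else 0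
def pvW (l : List (String × String × Int)) (k : String × String) : Int := (l.map (pvContrib k)).sum
def pvS (l : List (String × String × Int)) (k : String × String) : Int :=
  (l.map (fun e => if pvKey e = k then e.2.2 else 0)).sum
def pvNet (l : List (String × String × Int)) (k : String × String) : Int :=
  pvS l k - (if k.1 ≠ k.2 then pvS l (pvSwap k) else 0)

-- the common output shape
def pvOut (l : List (String × String × Int)) (k : String × String) : Option (String × String × Int) :=
  if pvW l k > 0 then some (k.1, k.2, pvW l k)
  else if pvW l k < 0 then some (k.2, k.1, -(pvW l k)) else none

def pvDictA (l : List (String × String × Int)) : PySem.Dict (String × String) Int :=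
  l.foldl get_neto_stepA PySem.Dict.empty
def pvDirB (l : List (String × String × Int)) : PySem.Dict (String × String) Int :=
  l.foldl get_neto_alt_dirStep PySem.Dict.empty
def pvDK (l : List (String × String × Int)) : List (String × String) :=
  PySem.Set.ofList (l.map pvKey)

-- B's second pass, abstracted: keys kept are those whose swap was not seen before
def pvKeep (l : List (String × String × Int)) : List (String × String) → List (String × String) → List (String × String)
  | _, [] => []
  | ps, k :: zs => (if pvSwap k ∈ ps then [] else [k]) ++ pvKeep l (ps ++ [k]) zs

theorem pvSwap_swap (k : String × String) : pvSwap (pvSwap k) = k := rfl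

theorem pvFK_append (l : List (String × String × Int)) (e : String × String × Int) :
    pvFK (l ++ [e]) = pvUpd (pvFK l) (pvKey e) := by
  simp [pvFK, List.foldl_append]

theorem pvFK_cases (l : List (String × String × Int)) (e : String × String × Int) :
    pvFK (l ++ [e]) = pvFK l ∨
      (pvFK (l ++ [e]) = pvFK l ++ [pvKey e] ∧ pvKey e ∉ pvFK l ∧ pvSwap (pvKey e) ∉ pvFK l) := by
  rw [pvFK_append, pvUpd]
  by_cases h : pvKey e ∈ pvFK l ∨ pvSwap (pvKey e) ∈ pvFK l
  · simp [h]
  · right; push Not at h; simp [h.1, h.2]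

theorem pvFK_nodup (l : List (String × String × Int)) : (pvFK l).Nodup := by
  induction l using List.reverseRecOn with
  | nil => simp [pvFK]
  | append_singleton l e ih =>
    rcases pvFK_cases l e with h | ⟨h, h1, _⟩
    · rw [h]; exact ih
    · rw [h]
      exact List.Nodup.append ih (List.nodup_singleton _) (by simpa using h1)

theorem pvFK_sub (l : List (String × String × Int)) (k : String × String) (h : k ∈ pvFK l) :
    k ∈ l.map pvKey := by
  induction l using List.reverseRecOn with
  | nil => simp [pvFK] at h
  | append_singleton l e ih =>
    rw [List.map_append, List.mem_append]
    rcases pvFK_cases l e with he | ⟨he, _, _⟩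
    · rw [he] at h; exact Or.inl (ih h)
    · rw [he, List.mem_append] at h
      rcases h with h | h
      · exact Or.inl (ih h)
      · simp at h; subst h; exact Or.inr (by simp)

theorem pvFK_mem (l : List (String × String × Int)) (e : String × String × Int) (h : e ∈ l) :
    pvKey e ∈ pvFK l ∨ pvSwap (pvKey e) ∈ pvFK l := by
  induction l using List.reverseRecOn with
  | nil => simp at h
  | append_singleton l f ih =>
    have mono : ∀ x, x ∈ pvFK l → x ∈ pvFK (l ++ [f]) := by
      intro x hx
      rcases pvFK_cases l f with he | ⟨he, _, _⟩ <;> rw [he] <;> simp [hx]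
    rw [List.mem_append, List.mem_singleton] at h
    rcases h with h | h
    · rcases ih h with h' | h'
      · exact Or.inl (mono _ h')
      · exact Or.inr (mono _ h')
    · subst h
      rw [pvFK_append, pvUpd]
      by_cases hc : pvKey e ∈ pvFK l ∨ pvSwap (pvKey e) ∈ pvFK l
      · rw [if_pos hc]; exact hc
      · rw [if_neg hc]; simp

theorem pvFK_nb (l : List (String × String × Int)) (k : String × String)
    (h1 : k ∈ pvFK l) (h2 : pvSwap k ∈ pvFK l) : k = pvSwap k := by
  induction l using List.reverseRecOn with
  | nil => simp [pvFK] at h1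
  | append_singleton l e ih =>
    rcases pvFK_cases l e with he | ⟨he, hk, hs⟩
    · rw [he] at h1 h2; exact ih h1 h2
    · rw [he, List.mem_append, List.mem_singleton] at h1 h2
      rcases h1 with h1 | h1 <;> rcases h2 with h2 | h2
      · exact ih h1 h2
      · exact absurd (show pvSwap (pvKey e) ∈ pvFK l by rw [← h2, pvSwap_swap]; exact h1) hs
      · subst h1; exact absurd h2 hs
      · exact h1.trans h2.symm

theorem pvW_append (l : List (String × String × Int)) (e : String × String × Int)
    (k : String × String) : pvW (l ++ [e]) k = pvW l k + pvContrib k e := by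
  simp [pvW]

theorem pvW_zero (l : List (String × String × Int)) (k : String × String)
    (h1 : k ∉ pvFK l) (h2 : pvSwap k ∉ pvFK l) : pvW l k = 0 := by
  have hz : ∀ e ∈ l, pvContrib k e = 0 := by
    intro e he
    unfold pvContrib
    rcases pvFK_mem l e he with hm | hm
    · rw [if_neg (show ¬ pvKey e = k by intro h; rw [h] at hm; exact h1 hm),
        if_neg (show ¬ (pvKey e = pvSwap k ∧ k.1 ≠ k.2) by
          rintro ⟨h, -⟩; rw [h] at hm; exact h2 hm)]
    · rw [if_neg (show ¬ pvKey e = k by intro h; rw [h] at hm; exact h2 hm),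
        if_neg (show ¬ (pvKey e = pvSwap k ∧ k.1 ≠ k.2) by
          rintro ⟨h, -⟩; rw [h, pvSwap_swap] at hm; exact h1 hm)]
  unfold pvW
  refine List.sum_eq_zero ?_
  intro x hx
  rw [List.mem_map] at hx
  obtain ⟨e, he, hx⟩ := hx
  rw [← hx]; exact hz e he

theorem pv_self_of_eq_swap {k : String × String} (h : k = pvSwap k) : k.1 = k.2 := by
  have := congrArg Prod.fst h; simpa [pvSwap] using this

theorem pv_eq_swap_of_self {p : String × String} (h : p.1 = p.2) : p = pvSwap p := by
  obtain ⟨a, b⟩ := p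
  simp [pvSwap] at h ⊢
  simp [h]

theorem pvDictA_char (l : List (String × String × Int)) :
    (pvDictA l).keys = pvFK l ∧ ∀ k ∈ pvFK l, (pvDictA l).getD k 0 = pvW l k := by
  induction l using List.reverseRecOn with
  | nil => constructor <;> simp [pvDictA, pvFK]
  | append_singleton l e ih =>
    obtain ⟨ihk, ihv⟩ := ih
    have hkey : (e.1, e.2.1) = pvKey e := rfl
    have hswp : (e.2.1, e.1) = pvSwap (pvKey e) := rfl
    have hstep : pvDictA (l ++ [e]) = get_neto_stepA (pvDictA l) e := by
      simp [pvDictA, List.foldl_append]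
    by_cases hc : pvKey e ∈ pvFK l
    · -- first branch: accumulate at (e.1, e.2.1)
      have hcon : (pvDictA l).contains (pvKey e) = true := by
        rw [PySem.Dict.contains_iff_mem_keys, ihk]; exact hc
      have hd : pvDictA (l ++ [e]) = (pvDictA l).modify (pvKey e) 0 (· + e.2.2) := by
        rw [hstep]; unfold get_neto_stepA; rw [hkey, if_pos hcon]
      have hfk : pvFK (l ++ [e]) = pvFK l := by
        rw [pvFK_append, pvUpd, if_pos (Or.inl hc)]
      refine ⟨?_, ?_⟩
      · rw [hd, hfk, PySem.Dict.keys_modify, PySem.Dict.keys_insert_of_contains _ _ hcon, ihk]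
      · intro k hk
        rw [hfk] at hk
        rw [hd, PySem.Dict.getD_modify, pvW_append]
        by_cases hke : k = pvKey e
        · subst hke
          rw [if_pos rfl, ihv _ hk, pvContrib, if_pos rfl]
        · rw [if_neg hke, ihv k hk, pvContrib,
            if_neg (fun h => hke h.symm),
            if_neg (show ¬ (pvKey e = pvSwap k ∧ k.1 ≠ k.2) by
              rintro ⟨h, hne⟩
              have hsk : pvSwap k ∈ pvFK l := h ▸ hc
              exact hne (pv_self_of_eq_swap (pvFK_nb l k hk hsk)))]
          ring
    · by_cases hc2 : pvSwap (pvKey e) ∈ pvFK l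
      · -- second branch: subtract at the reversed key
        have hcon : (pvDictA l).contains (pvKey e) = false := by
          rw [← Bool.not_eq_true, PySem.Dict.contains_iff_mem_keys, ihk]; exact hc
        have hcon2 : (pvDictA l).contains (pvSwap (pvKey e)) = true := by
          rw [PySem.Dict.contains_iff_mem_keys, ihk]; exact hc2
        have hd : pvDictA (l ++ [e]) = (pvDictA l).modify (pvSwap (pvKey e)) 0 (· - e.2.2) := by
          rw [hstep]; unfold get_neto_stepA
          rw [hkey, hswp, if_neg (by simp [hcon]), if_pos hcon2]
        have hfk : pvFK (l ++ [e]) = pvFK l := by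
          rw [pvFK_append, pvUpd, if_pos (Or.inr hc2)]
        have hne_self : pvKey e ≠ pvSwap (pvKey e) := by
          intro h; rw [h] at hc; exact hc hc2
        refine ⟨?_, ?_⟩
        · rw [hd, hfk, PySem.Dict.keys_modify, PySem.Dict.keys_insert_of_contains _ _ hcon2, ihk]
        · intro k hk
          rw [hfk] at hk
          rw [hd, PySem.Dict.getD_modify, pvW_append]
          by_cases hke : k = pvSwap (pvKey e)
          · subst hke
            rw [if_pos rfl, ihv _ hk, pvContrib, if_neg hne_self,
              if_pos ⟨by rw [pvSwap_swap], by
                intro h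
                simp [pvSwap] at h
                exact hne_self (pv_eq_swap_of_self h.symm)⟩]
            ring
          · rw [if_neg hke, ihv _ hk, pvContrib,
              if_neg (show ¬ pvKey e = k by intro h; rw [h] at hc; exact hc hk),
              if_neg (show ¬ (pvKey e = pvSwap k ∧ k.1 ≠ k.2) by
                rintro ⟨h, -⟩
                exact hke (by rw [h, pvSwap_swap]))]
            ring
      · -- third branch: insert a fresh key
        have hcon : (pvDictA l).contains (pvKey e) = false := by
          rw [← Bool.not_eq_true, PySem.Dict.contains_iff_mem_keys, ihk]; exact hc
        have hcon2 : (pvDictA l).contains (pvSwap (pvKey e)) = false := by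
          rw [← Bool.not_eq_true, PySem.Dict.contains_iff_mem_keys, ihk]; exact hc2
        have hd : pvDictA (l ++ [e]) = (pvDictA l).insert (pvKey e) e.2.2 := by
          rw [hstep]; unfold get_neto_stepA
          rw [hkey, hswp, if_neg (by simp [hcon]), if_neg (by simp [hcon2])]
        have hfk : pvFK (l ++ [e]) = pvFK l ++ [pvKey e] := by
          rw [pvFK_append, pvUpd, if_neg (show ¬ (pvKey e ∈ pvFK l ∨ pvSwap (pvKey e) ∈ pvFK l) by
            rintro (h | h)
            exacts [hc h, hc2 h])]
        refine ⟨?_, ?_⟩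
        · rw [hd, hfk, PySem.Dict.keys_insert_of_not_contains _ _ hcon, ihk]
        · intro k hk
          rw [hfk, List.mem_append, List.mem_singleton] at hk
          rw [hd, PySem.Dict.getD_insert, pvW_append]
          rcases hk with hk | hk
          · rw [if_neg (show k ≠ pvKey e by intro h; rw [h] at hk; exact hc hk),
              ihv _ hk, pvContrib,
              if_neg (show ¬ pvKey e = k by intro h; rw [h] at hc; exact hc hk),
              if_neg (show ¬ (pvKey e = pvSwap k ∧ k.1 ≠ k.2) by
                rintro ⟨h, -⟩
                apply hc2
                rw [show pvSwap (pvKey e) = k by rw [h, pvSwap_swap]]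
                exact hk)]
            ring
          · subst hk
            rw [if_pos rfl, pvW_zero l _ hc hc2, pvContrib, if_pos rfl]
            ring

theorem pvA_eq (l : List (String × String × Int)) :
    get_neto l = (pvFK l).filterMap (pvOut l) := by
  obtain ⟨hk, hv⟩ := pvDictA_char l
  have hnd : (pvDictA l).keys.Nodup := by rw [hk]; exact pvFK_nodup l
  have hda : List.foldl get_neto_stepA PySem.Dict.empty l = pvDictA l := rfl
  simp only [get_neto]
  rw [hda, PySem.Dict.items_eq_map_keys _ hnd 0, hk, List.filterMap_map]
  refine List.filterMap_congr ?_
  intro k hkm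
  simp only [Function.comp]
  rw [hv k hkm]
  unfold pvOut
  split_ifs <;> first | rfl | omega

theorem pvDirB_getD (l : List (String × String × Int)) (d : PySem.Dict (String × String) Int)
    (k : String × String) :
    (l.foldl get_neto_alt_dirStep d).getD k 0 = d.getD k 0 + pvS l k := by
  induction l generalizing d with
  | nil => simp [pvS]
  | cons e l ih =>
    rw [List.foldl_cons, ih]
    unfold get_neto_alt_dirStep
    rw [PySem.Dict.getD_insert]
    simp only [pvS, List.map_cons, List.sum_cons,
      show ((e.1, e.2.1) : String × String) = pvKey e from rfl]
    by_cases h : k = pvKey e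
    · rw [if_pos h, if_pos h.symm]
      subst h
      ring
    · rw [if_neg h, if_neg (fun hh => h hh.symm)]
      ring

theorem pvDirB_keys (l : List (String × String × Int)) : (pvDirB l).keys = pvDK l := by
  unfold pvDirB pvDK
  calc (List.foldl get_neto_alt_dirStep PySem.Dict.empty l).keys
      = PySem.Set.update (PySem.Dict.empty : PySem.Dict (String × String) Int).keys (l.map pvKey) :=
        PySem.Dict.keys_foldl_insert_key l pvKey (fun d e => d.getD (pvKey e) 0 + e.2.2) _
    _ = PySem.Set.ofList (l.map pvKey) := by
        rw [show (PySem.Dict.empty : PySem.Dict (String × String) Int).keys = [] from rfl,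
          PySem.Set.update_nil_left]

theorem pvDirB_getD' (l : List (String × String × Int)) (k : String × String) :
    (pvDirB l).getD k 0 = pvS l k := by
  have h := pvDirB_getD l PySem.Dict.empty k
  simpa [pvDirB, PySem.Dict.getD_empty] using h

theorem pvDirB_items (l : List (String × String × Int)) :
    (pvDirB l).items = (pvDK l).map (fun k => (k, pvS l k)) := by
  have hnd : (pvDirB l).keys.Nodup := by rw [pvDirB_keys]; exact PySem.Set.nodup_ofList _
  rw [PySem.Dict.items_eq_map_keys _ hnd 0, pvDirB_keys]
  exact List.map_congr_left (fun k _ => by rw [pvDirB_getD'])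

theorem pvContrib_eq (k : String × String) (e : String × String × Int) :
    pvContrib k e = (if pvKey e = k then e.2.2 else 0) -
      (if k.1 ≠ k.2 then (if pvKey e = pvSwap k then e.2.2 else 0) else 0) := by
  by_cases h3 : k.1 = k.2
  · rw [if_neg (show ¬ k.1 ≠ k.2 by simp [h3]), sub_zero]
    unfold pvContrib
    by_cases h1 : pvKey e = k
    · simp [h1]
    · rw [if_neg h1, if_neg (by rintro ⟨-, hne⟩; exact hne h3), if_neg h1]
  · rw [if_pos (show k.1 ≠ k.2 from h3)]
    unfold pvContrib
    by_cases h1 : pvKey e = k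
    · have h2 : ¬ pvKey e = pvSwap k := by
        intro h2; exact h3 (pv_self_of_eq_swap (h1.symm.trans h2))
      rw [if_pos h1, if_pos h1, if_neg h2]; ring
    · rw [if_neg h1, if_neg h1]
      by_cases h2 : pvKey e = pvSwap k
      · rw [if_pos ⟨h2, h3⟩, if_pos h2]; ring
      · rw [if_neg (by rintro ⟨h, -⟩; exact h2 h), if_neg h2]; ring

theorem pvNet_eq_pvW (l : List (String × String × Int)) (k : String × String) :
    pvNet l k = pvW l k := by
  unfold pvNet pvW pvS
  by_cases h3 : k.1 ≠ k.2
  · rw [if_pos h3]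
    induction l with
    | nil => simp
    | cons e l ih =>
      simp only [List.map_cons, List.sum_cons, pvContrib_eq, if_pos h3]
      linarith [ih]
  · rw [if_neg h3, sub_zero]
    refine congrArg List.sum (List.map_congr_left ?_)
    intro e _
    rw [pvContrib_eq, if_neg h3, sub_zero]

theorem pvLoopB (l : List (String × String × Int)) (zs ps : List (String × String))
    (out0 : List (String × String × Int)) (done : PySem.Set (String × String))
    (hnd : (ps ++ zs).Nodup) (hdone : ∀ x ∈ zs, (x ∈ done ↔ pvSwap x ∈ ps)) :
    (zs.foldl (fun acc k => get_neto_alt_body (pvDirB l) acc (k, pvS l k)) (out0, done)).1 =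
      out0 ++ (pvKeep l ps zs).filterMap (pvOut l) := by
  induction zs generalizing ps out0 done with
  | nil => simp [pvKeep]
  | cons k zs ih =>
    have hnd' : ((ps ++ [k]) ++ zs).Nodup := by
      rw [List.append_assoc, List.singleton_append]; exact hnd
    have hdisj : ps.Disjoint (k :: zs) := List.disjoint_of_nodup_append hnd
    rw [List.foldl_cons]
    by_cases hk : k ∈ done
    · have hswap_ps : pvSwap k ∈ ps := (hdone k (List.mem_cons_self)).mp hk
      have hcon : PySem.Set.contains done k = true := (PySem.Set.contains_iff done k).mpr hk
      have hbody : get_neto_alt_body (pvDirB l) (out0, done) (k, pvS l k) = (out0, done) := by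
        unfold get_neto_alt_body
        rw [if_pos hcon]
      rw [hbody, ih (ps ++ [k]) out0 done hnd' ?_]
      · rw [pvKeep, if_pos hswap_ps, List.nil_append]
      · intro x hx
        rw [List.mem_append, List.mem_singleton]
        constructor
        · intro h; exact Or.inl ((hdone x (List.mem_cons_of_mem _ hx)).mp h)
        · rintro (h | h)
          · exact (hdone x (List.mem_cons_of_mem _ hx)).mpr h
          · exfalso
            have hxv : x = pvSwap k := by rw [← h, pvSwap_swap]
            exact hdisj (hxv ▸ hswap_ps) (List.mem_cons_of_mem _ hx)
    · have hswap_ps : pvSwap k ∉ ps := fun h => hk ((hdone k List.mem_cons_self).mpr h)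
      have hcon : PySem.Set.contains done k = false := by
        rw [← Bool.not_eq_true, PySem.Set.contains_iff]; exact hk
      have hnet : pvS l k - (if k.1 ≠ k.2 then (pvDirB l).getD (k.2, k.1) 0 else 0) = pvW l k := by
        rw [show ((k.2, k.1) : String × String) = pvSwap k from rfl, pvDirB_getD', ← pvNet_eq_pvW]
        rfl
      have hbody : get_neto_alt_body (pvDirB l) (out0, done) (k, pvS l k)
          = (out0 ++ (pvOut l k).toList, PySem.Set.add done (pvSwap k)) := by
        unfold get_neto_alt_body
        rw [if_neg (by rw [hcon]; simp)]
        simp only []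
        rw [hnet]
        unfold pvOut
        rcases lt_trichotomy (pvW l k) 0 with h | h | h
        · rw [if_neg (by omega), if_pos h, if_neg (by omega), if_pos h]
          rfl
        · rw [if_neg (by omega), if_neg (by omega), if_neg (by omega), if_neg (by omega)]
          simp [pvSwap]
        · rw [if_pos h, if_pos h]
          rfl
      rw [hbody, ih (ps ++ [k]) _ _ hnd' ?_]
      · rw [pvKeep, if_neg hswap_ps, List.filterMap_append, List.append_assoc]
        cases h : pvOut l k <;> simp [h]
      · intro x hx
        rw [PySem.Set.mem_add, List.mem_append, List.mem_singleton]
        constructor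
        · rintro (h | h)
          · exact Or.inl ((hdone x (List.mem_cons_of_mem _ hx)).mp h)
          · exact Or.inr (by rw [h, pvSwap_swap])
        · rintro (h | h)
          · exact Or.inl ((hdone x (List.mem_cons_of_mem _ hx)).mpr h)
          · exact Or.inr (by rw [← h, pvSwap_swap])

theorem pvKeep_append (l : List (String × String × Int)) (zs ps : List (String × String))
    (k : String × String) :
    pvKeep l ps (zs ++ [k]) = pvKeep l ps zs ++ (if pvSwap k ∈ ps ++ zs then [] else [k]) := by
  induction zs generalizing ps with
  | nil => simp [pvKeep]
  | cons z zs ih =>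
    rw [List.cons_append, pvKeep, pvKeep, ih (ps ++ [z]), List.append_assoc]
    simp [List.append_assoc]

theorem pvDK_append (l : List (String × String × Int)) (e : String × String × Int) :
    pvDK (l ++ [e]) = PySem.Set.add (pvDK l) (pvKey e) := by
  unfold pvDK
  rw [List.map_append, List.map_singleton, PySem.Set.ofList_append_singleton]

theorem pvKeep_eq_fk (l : List (String × String × Int)) : pvKeep l [] (pvDK l) = pvFK l := by
  induction l using List.reverseRecOn with
  | nil => simp [pvDK, pvFK, PySem.Set.ofList_nil, pvKeep]
  | append_singleton l e ih =>
    have hkeep_irrel : ∀ (l' : List (String × String × Int)) ps zs, pvKeep l' ps zs = pvKeep l ps zs := by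
      intro l' ps zs
      induction zs generalizing ps with
      | nil => rw [pvKeep, pvKeep]
      | cons z zs ihz => rw [pvKeep, pvKeep, ihz]
    rw [pvDK_append, pvFK_append, pvUpd]
    by_cases hin : pvKey e ∈ l.map pvKey
    · rw [PySem.Set.add_of_mem (s := pvDK l) ((PySem.Set.mem_ofList _ _).mpr hin), hkeep_irrel, ih]
      obtain ⟨e', he', hke⟩ := List.mem_map.mp hin
      rw [if_pos (hke ▸ pvFK_mem l e' he')]
    · rw [PySem.Set.add_of_not_mem (s := pvDK l) (fun h => hin ((PySem.Set.mem_ofList _ _).mp h)),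
        hkeep_irrel, pvKeep_append, List.nil_append, ih]
      by_cases hsw : pvSwap (pvKey e) ∈ pvDK l
      · have hswm : pvSwap (pvKey e) ∈ l.map pvKey := (PySem.Set.mem_ofList _ _).mp hsw
        rw [if_pos hsw, List.append_nil]
        obtain ⟨e', he', hke⟩ := List.mem_map.mp hswm
        have := pvFK_mem l e' he'
        rw [hke] at this
        rw [if_pos (by
          rcases this with h | h
          · exact Or.inr h
          · rw [pvSwap_swap] at h; exact Or.inl h)]
      · have hswm : pvSwap (pvKey e) ∉ l.map pvKey := fun h => hsw ((PySem.Set.mem_ofList _ _).mpr h)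
        rw [if_neg hsw,
          if_neg (show ¬ (pvKey e ∈ pvFK l ∨ pvSwap (pvKey e) ∈ pvFK l) by
            rintro (h | h)
            · exact hin (pvFK_sub l _ h)
            · exact hswm (pvFK_sub l _ h))]

theorem pvB_eq (l : List (String × String × Int)) :
    get_neto_alt l = (pvFK l).filterMap (pvOut l) := by
  have h1 : List.foldl get_neto_alt_dirStep PySem.Dict.empty l = pvDirB l := rfl
  simp only [get_neto_alt]
  rw [h1, pvDirB_items, List.foldl_map]
  have hloop := pvLoopB l (pvDK l) [] [] PySem.Set.empty
    (by simp only [List.nil_append]; exact PySem.Set.nodup_ofList (l.map pvKey)) (by intro x hx; simp [PySem.Set.empty])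
  rw [pvKeep_eq_fk] at hloop
  simpa using hloop

-- ===== VERDICT (by name: the statement is the Claim_ definition above) =====
theorem get_neto_spec : Claim_equal_get_neto := by
  intro edges _
  unfold Spec_get_neto
  rw [pvA_eq, pvB_eq]
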